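-- pv_equiv track=rewrite | github.com/4ahul/dhara-redevelopment | shared/service_config.py | get_workflow_dependencies
-- ===== SOURCE A (Python) =====
-- from typing import Dict, Any, List
--
-- WORKFLOW_STEPS = [
--     {
--         "step": 1,
--         "service": "site_analysis",
--         "depends_on": [],
--         "provides": ["lat", "lng", "ward", "area_type", "zone_inference"],
--     },
--     {
--         "step": 2,
--         "service": "height_service",
--         "depends_on": [1],
--         "provides": ["max_height_m", "max_floors", "aai_zone"],
--     },
--     {
--         "step": 3,
--         "service": "zone_regulations",
--         "depends_on": [1],
--         "provides": ["crz_zone", "dcpr_zone", "regulations"],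
--     },
--     {
--         "step": 4,
--         "service": "dp_report",
--         "depends_on": [1, 2],
--         "provides": ["reservations", "allowed_uses", "restrictions"],
--     },
--     {
--         "step": 5,
--         "service": "ready_reckoner",
--         "depends_on": [1],
--         "provides": ["rr_rates", "premium_rates"],
--     },
--     {
--         "step": 6,
--         "service": "premium_checker",
--         "depends_on": [5],
--         "provides": ["total_charges", "breakdown"],
--     },
--     {
--         "step": 7,
--         "service": "report_generator",
--         "depends_on": [1, 2, 3, 4, 5, 6],
--         "provides": ["excel_report"],
--     },
-- ]
--
-- def get_workflow_dependencies(service_name: str) -> List[str]: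
--     """Get all services this service depends on."""
--     for step in WORKFLOW_STEPS:
--         if step["service"] == service_name:
--             deps = []
--             for d in step["depends_on"]:
--                 for s in WORKFLOW_STEPS:
--                     if s["step"] == d:
--                         deps.append(s["service"])
--             return deps
--     return []
-- ===== SOURCE B (Python) =====
-- from typing import List
--
-- WORKFLOW_STEPS = [
--     {"step": 1, "service": "site_analysis", "depends_on": [],
--      "provides": ["lat", "lng", "ward", "area_type", "zone_inference"]},
--     {"step": 2, "service": "height_service", "depends_on": [1],
--      "provides": ["max_height_m", "max_floors", "aai_zone"]},
--     {"step": 3, "service": "zone_regulations", "depends_on": [1],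
--      "provides": ["crz_zone", "dcpr_zone", "regulations"]},
--     {"step": 4, "service": "dp_report", "depends_on": [1, 2],
--      "provides": ["reservations", "allowed_uses", "restrictions"]},
--     {"step": 5, "service": "ready_reckoner", "depends_on": [1],
--      "provides": ["rr_rates", "premium_rates"]},
--     {"step": 6, "service": "premium_checker", "depends_on": [5],
--      "provides": ["total_charges", "breakdown"]},
--     {"step": 7, "service": "report_generator", "depends_on": [1, 2, 3, 4, 5, 6],
--      "provides": ["excel_report"]},
-- ]
--
-- # Built once at module load: index tables replacing the nested scans.
-- _BY_STEP = {s["step"]: s["service"] for s in WORKFLOW_STEPS}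
-- _DEPS_BY_NAME = {s["service"]: s["depends_on"] for s in WORKFLOW_STEPS}
--
-- def get_workflow_dependencies(service_name: str) -> List[str]:
--     """Get all services this service depends on."""
--     deps = _DEPS_BY_NAME.get(service_name)
--     if deps is None:
--         return []
--     return [_BY_STEP[d] for d in deps]
-- ===== Notes on version B (the rewrite author's own statement) =====
-- stated objective: simpler
-- what changed: Replaced the nested scans over WORKFLOW_STEPS (linear search for the service, then an inner linear search per dependency step number) with two index dicts built once at module load, so the function is a single .get plus a flat comprehension.
import Mathlib
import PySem

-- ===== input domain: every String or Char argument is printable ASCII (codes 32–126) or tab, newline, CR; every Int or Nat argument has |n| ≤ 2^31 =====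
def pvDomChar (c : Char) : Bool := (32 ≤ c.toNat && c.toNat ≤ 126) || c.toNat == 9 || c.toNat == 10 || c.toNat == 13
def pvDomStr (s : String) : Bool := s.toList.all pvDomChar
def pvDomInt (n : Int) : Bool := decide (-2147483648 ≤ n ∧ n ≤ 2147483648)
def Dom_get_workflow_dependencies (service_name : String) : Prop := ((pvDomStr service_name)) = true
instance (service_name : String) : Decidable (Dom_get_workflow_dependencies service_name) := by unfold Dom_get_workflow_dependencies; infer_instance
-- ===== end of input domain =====

-- B replaces A's nested scans with two index dicts built once; same return value, simpler per-call code.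

-- WORKFLOW_STEPS: (step, service, depends_on); the "provides" field is never read by either program.
def pvSteps : List (Int × String × List Int) :=
  [ (1, "site_analysis", []),
    (2, "height_service", [1]),
    (3, "zone_regulations", [1]),
    (4, "dp_report", [1, 2]),
    (5, "ready_reckoner", [1]),
    (6, "premium_checker", [5]),
    (7, "report_generator", [1, 2, 3, 4, 5, 6]) ]

-- ===== PORT A =====
-- inner loop: 'for s in WORKFLOW_STEPS: if s["step"] == d: deps.append(s["service"])'
def pvInnerA (d : Int) : List (Int × String × List Int) → List String
  | [] => []
  | s :: rest => if s.1 == d then s.2.1 :: pvInnerA d rest else pvInnerA d rest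

-- outer loop: first step whose "service" equals service_name; then accumulate deps over its depends_on
def pvOuterA (service_name : String) : List (Int × String × List Int) → List String
  | [] => []
  | st :: rest =>
    if st.2.1 == service_name then
      st.2.2.foldl (fun deps d => deps ++ pvInnerA d pvSteps) []
    else pvOuterA service_name rest

def get_workflow_dependencies (service_name : String) : List String :=
  pvOuterA service_name pvSteps

-- ===== PORT B =====
-- _BY_STEP = {s["step"]: s["service"] for s in WORKFLOW_STEPS}
def pvByStep : PySem.Dict Int String :=
  pvSteps.foldl (fun d s => d.insert s.1 s.2.1) PySem.Dict.empty

-- _DEPS_BY_NAME = {s["service"]: s["depends_on"] for s in WORKFLOW_STEPS}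
def pvDepsByName : PySem.Dict String (List Int) :=
  pvSteps.foldl (fun d s => d.insert s.2.1 s.2.2) PySem.Dict.empty

def get_workflow_dependencies_alt (service_name : String) : List String :=
  match pvDepsByName.get? service_name with
  | none => []
  -- _BY_STEP[d]: exact here — every step number in a depends_on list is a key of _BY_STEP
  | some deps => deps.map (fun d => (pvByStep.get? d).getD "")

-- ===== PRECONDITION & SPEC =====
def Spec_get_workflow_dependencies (service_name : String) (out : List String) : Prop := out = get_workflow_dependencies_alt service_name
instance (service_name : String) (out : List String) : Decidable (Spec_get_workflow_dependencies service_name out) := by unfold Spec_get_workflow_dependencies; infer_instance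

-- ===== CLAIM (what is proved, stated in full; the proofs are below) =====
def Claim_equal_get_workflow_dependencies : Prop := ∀ (service_name : String), Dom_get_workflow_dependencies service_name → Spec_get_workflow_dependencies service_name (get_workflow_dependencies service_name)

-- ===== LEMMAS AND PROOFS =====

-- ===== VERDICT (by name: the statement is the Claim_ definition above) =====
theorem get_workflow_dependencies_spec : Claim_equal_get_workflow_dependencies := by
  intro s _
  unfold Spec_get_workflow_dependencies get_workflow_dependencies get_workflow_dependencies_alt
  by_cases h1 : s = "site_analysis"; · subst h1; decide
  by_cases h2 : s = "height_service"; · subst h2; decide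
  by_cases h3 : s = "zone_regulations"; · subst h3; decide
  by_cases h4 : s = "dp_report"; · subst h4; decide
  by_cases h5 : s = "ready_reckoner"; · subst h5; decide
  by_cases h6 : s = "premium_checker"; · subst h6; decide
  by_cases h7 : s = "report_generator"; · subst h7; decide
  simp [pvOuterA, pvSteps, pvDepsByName, PySem.Dict.get?, PySem.Dict.insert,
    PySem.Dict.empty, Ne.symm h1, Ne.symm h2, Ne.symm h3, Ne.symm h4, Ne.symm h5,
    Ne.symm h6, Ne.symm h7]
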